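-- pv_equiv track=rewrite | github.com/wyf7685/Pac-man | Maze.py | generate_maze
-- ===== SOURCE A (Python) =====
-- from typing import List, Optional, Tuple
--
-- WALL = 0
--
-- PASS = 1
--
-- MazeType = List[List[int]]
--
-- def generate_maze(walls: List[List[int]]) -> MazeType:
--     large_maze = [[PASS for _ in range(101)] for _ in range(101)]
--
--     # For each segment of the wall, convert it to large_maze with a ratio of pixels:coordinates = 6:1
--     for pos in walls:
--         x, y, dx, dy = [i // 6 for i in pos]
--         for i in range(max(x - 2, 0), min(x + dx + 2, 101)):
--             for j in range(max(y - 2, 0), min(y + dy + 2, 101)):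
--                 large_maze[i][j] = WALL
--
--     # Sampling from large_maze to maze
--     maze = [[0 for _ in range(21)] for _ in range(21)]
--     for i in range(20):
--         for j in range(20):
--             maze[i][j] = large_maze[i * 5 + 1][j * 5 + 1]
--
--     return maze
-- ===== SOURCE B (Python) =====
-- def _blocked(walls, px, py):
--     # True iff some wall's (scaled, padded, clamped) rectangle covers pixel (px, py)
--     for pos in walls:
--         x, y, dx, dy = (p // 6 for p in pos)
--         if max(x - 2, 0) <= px < min(x + dx + 2, 101) and max(y - 2, 0) <= py < min(y + dy + 2, 101):
--             return True
--     return False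
--
--
-- def generate_maze(walls):
--     # Test each of the 21x21 sample points directly against the wall rectangles,
--     # never allocating the 101x101 intermediate grid.
--     return [
--         [0 if (i >= 20 or j >= 20 or _blocked(walls, i * 5 + 1, j * 5 + 1)) else 1
--          for j in range(21)]
--         for i in range(21)
--     ]
-- ===== Notes on version B (the rewrite author's own statement) =====
-- stated objective: simpler
-- what changed: Instead of rasterizing every wall onto a 101x101 grid and then subsampling, B tests each of the 21x21 sample points directly against each wall's clamped rectangle, never allocating the intermediate grid.
import Mathlib
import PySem

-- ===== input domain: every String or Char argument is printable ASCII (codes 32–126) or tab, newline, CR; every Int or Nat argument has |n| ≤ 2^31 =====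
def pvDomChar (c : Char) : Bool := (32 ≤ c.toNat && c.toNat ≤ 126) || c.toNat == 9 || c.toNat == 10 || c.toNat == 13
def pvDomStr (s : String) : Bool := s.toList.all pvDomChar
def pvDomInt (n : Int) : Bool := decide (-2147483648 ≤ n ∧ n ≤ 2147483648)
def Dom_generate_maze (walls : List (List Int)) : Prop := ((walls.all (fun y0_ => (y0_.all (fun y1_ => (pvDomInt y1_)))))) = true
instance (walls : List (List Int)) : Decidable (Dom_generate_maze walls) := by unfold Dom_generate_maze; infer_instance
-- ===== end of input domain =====

-- B tests each of the 21x21 sample points directly against each wall's clamped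
-- rectangle instead of rasterizing the walls onto a 101x101 grid and subsampling
-- (objective: simpler).

-- ===== PORT A =====
def WALL : Int := 0
def PASS : Int := 1

-- Python `g[i][j] = v`; at every use site 0 ≤ i, j and both indices are in range
def pvSetCell (g : List (List Int)) (i j : Int) (v : Int) : List (List Int) :=
  g.modify i.natAbs (fun row => row.set j.natAbs v)

-- Python `g[a][b]`; at every use site both indices are in range (so no IndexError)
def pvGetCell (g : List (List Int)) (a b : Int) : Int :=
  (g.getD a.natAbs []).getD b.natAbs 0

-- the 101x101 `large_maze` after the first loop of A
def pvLarge (walls : List (List Int)) : List (List Int) :=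
  walls.foldl (fun g pos =>
    match pos.map (fun i => PySem.Int.floordiv i 6) with
    | [x, y, dx, dy] =>
        (PySem.List.pyRange (max (x - 2) 0) (min (x + dx + 2) 101) 1).foldl (fun g i =>
          (PySem.List.pyRange (max (y - 2) 0) (min (y + dy + 2) 101) 1).foldl (fun g j =>
            pvSetCell g i j WALL) g) g
    | _ => g  -- unreachable under Pre_ (a wall of length ≠ 4 raises ValueError in Python)
    ) (List.replicate 101 (List.replicate 101 PASS))

def generate_maze (walls : List (List Int)) : List (List Int) :=
  (PySem.List.pyRange 0 20 1).foldl (fun m i =>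
    (PySem.List.pyRange 0 20 1).foldl (fun m j =>
      pvSetCell m i j (pvGetCell (pvLarge walls) (i * 5 + 1) (j * 5 + 1))) m)
    (List.replicate 21 (List.replicate 21 0))

-- ===== PORT B =====
def pvBlocked (walls : List (List Int)) (px py : Int) : Bool :=
  walls.any (fun pos =>
    match pos.map (fun p => PySem.Int.floordiv p 6) with
    | [x, y, dx, dy] =>
        decide (max (x - 2) 0 ≤ px) && decide (px < min (x + dx + 2) 101) &&
        decide (max (y - 2) 0 ≤ py) && decide (py < min (y + dy + 2) 101)
    | _ => false)  -- unreachable under Pre_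

def generate_maze_alt (walls : List (List Int)) : List (List Int) :=
  (PySem.List.pyRange 0 21 1).map (fun i =>
    (PySem.List.pyRange 0 21 1).map (fun j =>
      if 20 ≤ i ∨ 20 ≤ j ∨ pvBlocked walls (i * 5 + 1) (j * 5 + 1) then 0 else 1))

-- ===== PRECONDITION & SPEC =====
-- Pre_ excludes exactly the walls of length ≠ 4, on which Python A raises a
-- ValueError at the 4-tuple unpacking (B raises the same error there).
def Pre_generate_maze (walls : List (List Int)) : Prop := ∀ pos ∈ walls, pos.length = 4
instance (walls : List (List Int)) : Decidable (Pre_generate_maze walls) := by unfold Pre_generate_maze; infer_instance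

def pvWitness_generate_maze : List (List Int) := [[0, 0, 30, 6], [60, 60, 12, 12]]

def Spec_generate_maze (walls : List (List Int)) (out : List (List Int)) : Prop := out = generate_maze_alt walls
instance (walls : List (List Int)) (out : List (List Int)) : Decidable (Spec_generate_maze walls out) := by unfold Spec_generate_maze; infer_instance

-- ===== CLAIM (what is proved, stated in full; the proofs are below) =====
def Claim_equal_generate_maze : Prop := ∀ (walls : List (List Int)), Dom_generate_maze walls → Pre_generate_maze walls → Spec_generate_maze walls (generate_maze walls)

-- ===== LEMMAS AND PROOFS =====
def pvShape (n : Nat) (g : List (List Int)) : Prop :=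
  g.length = n ∧ ∀ p, p < n → (g[p]?.getD []).length = n
def pvRead (g : List (List Int)) (p q : Nat) : Int := ((g[p]?.getD [])[q]?.getD 0)

theorem pvShape_setCell {n : Nat} {g : List (List Int)} (hg : pvShape n g)
    (i j v : Int) : pvShape n (pvSetCell g i j v) := by
  obtain ⟨hlen, hrow⟩ := hg
  refine ⟨by simp [pvSetCell, hlen], fun p hp => ?_⟩
  have := hrow p hp
  simp only [pvSetCell, List.getElem?_modify]
  cases hgp : g[p]? with
  | none => simp [hgp] at this ⊢; omega
  | some row =>
    simp [hgp] at this ⊢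
    split_ifs <;> simp [this]

theorem pvRead_setCell {n : Nat} {g : List (List Int)} (hg : pvShape n g)
    {i j : Int} (hi0 : 0 ≤ i) (hin : i < n) (hj0 : 0 ≤ j) (hjn : j < n)
    (v : Int) (p q : Nat) (hp : p < n) (hq : q < n) :
    pvRead (pvSetCell g i j v) p q =
      if i = (p : Int) ∧ j = (q : Int) then v else pvRead g p q := by
  obtain ⟨hlen, hrow⟩ := hg
  have hrlen := hrow p hp
  simp only [pvRead, pvSetCell, List.getElem?_modify]
  cases hgp : g[p]? with
  | none =>
    exfalso
    have : p < g.length := by omega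
    simp [List.getElem?_eq_getElem this] at hgp
  | some row =>
    simp only [hgp, Option.map, Option.getD]
    have hrl : row.length = n := by simpa [hgp] using hrlen
    by_cases hip : i.natAbs = p
    · have hieq : i = (p : Int) := by omega
      simp only [if_pos hip, List.getElem?_set, hrl]
      by_cases hjq : j.natAbs = q
      · have hjeq : j = (q : Int) := by omega
        rw [hjq]
        simp [List.getElem?_set, hrl, hq, hieq, hjeq, Option.getD]
      · have hjne : ¬ (j = (q : Int)) := by omega
        simp [hjq, hieq, hjne, hgp]
    · have hine : ¬ (i = (p : Int)) := by omega
      simp [hip, hine, hgp]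

theorem pvColFold {n : Nat} (G : Int → Int → Int) (i : Int)
    (hi0 : 0 ≤ i) (hin : i < n) :
    ∀ (ylo yhi : Int) (g : List (List Int)), pvShape n g → 0 ≤ ylo → yhi ≤ n →
    pvShape n ((PySem.List.pyRange ylo yhi 1).foldl (fun g j => pvSetCell g i j (G i j)) g) ∧
    ∀ p q : Nat, p < n → q < n →
      pvRead ((PySem.List.pyRange ylo yhi 1).foldl (fun g j => pvSetCell g i j (G i j)) g) p q =
        if i = (p : Int) ∧ ylo ≤ (q : Int) ∧ (q : Int) < yhi then G i q else pvRead g p q := by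
  intro ylo yhi
  generalize hk : (yhi - ylo).toNat = k
  induction k generalizing ylo with
  | zero =>
    intro g hg hylo hyhi
    rw [PySem.List.pyRange_one_eq_nil (by omega)]
    refine ⟨hg, fun p q hp hq => ?_⟩
    have : ¬ (i = (p : Int) ∧ ylo ≤ (q : Int) ∧ (q : Int) < yhi) := by omega
    simp [List.foldl_nil, this]
  | succ k ih =>
    intro g hg hylo hyhi
    rw [PySem.List.pyRange_one_cons (by omega), List.foldl_cons]
    have hg' := pvShape_setCell hg i ylo (G i ylo)
    obtain ⟨hsh, hread⟩ := ih (ylo + 1) (by omega) _ hg' (by omega) hyhi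
    refine ⟨hsh, fun p q hp hq => ?_⟩
    rw [hread p q hp hq,
        pvRead_setCell hg hi0 hin hylo (by omega) (G i ylo) p q hp hq]
    by_cases h1 : i = (p : Int)
    · by_cases h2 : ylo + 1 ≤ (q : Int) ∧ (q : Int) < yhi
      · rw [if_pos ⟨h1, h2⟩, if_pos ⟨h1, by omega, h2.2⟩]
      · by_cases h3 : ylo = (q : Int)
        · rw [if_neg (by omega), if_pos ⟨h1, h3⟩, if_pos ⟨h1, by omega, by omega⟩, h3]
        · rw [if_neg (by omega), if_neg (fun h => h3 h.2), if_neg (by omega)]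
    · rw [if_neg (fun h => h1 h.1), if_neg (fun h => h1 h.1), if_neg (fun h => h1 h.1)]

theorem pvRectFold {n : Nat} (G : Int → Int → Int) :
    ∀ (xlo xhi ylo yhi : Int) (g : List (List Int)), pvShape n g →
    0 ≤ xlo → xhi ≤ n → 0 ≤ ylo → yhi ≤ n →
    pvShape n ((PySem.List.pyRange xlo xhi 1).foldl (fun g i =>
        (PySem.List.pyRange ylo yhi 1).foldl (fun g j => pvSetCell g i j (G i j)) g) g) ∧
    ∀ p q : Nat, p < n → q < n →
      pvRead ((PySem.List.pyRange xlo xhi 1).foldl (fun g i =>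
          (PySem.List.pyRange ylo yhi 1).foldl (fun g j => pvSetCell g i j (G i j)) g) g) p q =
        if xlo ≤ (p : Int) ∧ (p : Int) < xhi ∧ ylo ≤ (q : Int) ∧ (q : Int) < yhi
        then G p q else pvRead g p q := by
  intro xlo xhi ylo yhi
  generalize hk : (xhi - xlo).toNat = k
  induction k generalizing xlo with
  | zero =>
    intro g hg hxlo hxhi hylo hyhi
    rw [PySem.List.pyRange_one_eq_nil (a := xlo) (b := xhi) (by omega)]
    exact ⟨hg, fun p q hp hq => by rw [List.foldl_nil, if_neg (by omega)]⟩
  | succ k ih =>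
    intro g hg hxlo hxhi hylo hyhi
    rw [PySem.List.pyRange_one_cons (a := xlo) (b := xhi) (by omega), List.foldl_cons]
    obtain ⟨hg1, hread1⟩ := pvColFold G xlo hxlo (by omega) ylo yhi g hg hylo hyhi
    obtain ⟨hsh, hread⟩ := ih (xlo + 1) (by omega) _ hg1 (by omega) hxhi hylo hyhi
    refine ⟨hsh, fun p q hp hq => ?_⟩
    rw [hread p q hp hq, hread1 p q hp hq]
    by_cases h2 : ylo ≤ (q : Int) ∧ (q : Int) < yhi
    · by_cases h1 : xlo + 1 ≤ (p : Int) ∧ (p : Int) < xhi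
      · rw [if_pos ⟨h1.1, h1.2, h2.1, h2.2⟩, if_pos ⟨by omega, h1.2, h2.1, h2.2⟩]
      · by_cases h3 : xlo = (p : Int)
        · rw [if_neg (by omega), if_pos ⟨h3, h2.1, h2.2⟩,
              if_pos ⟨by omega, by omega, h2.1, h2.2⟩, h3]
        · rw [if_neg (by omega), if_neg (fun h => h3 h.1), if_neg (by omega)]
    · rw [if_neg (by omega), if_neg (fun h => h2 h.2), if_neg (by omega)]

theorem pvWallsFold (walls : List (List Int)) (hpre : ∀ pos ∈ walls, pos.length = 4) :
    ∀ (g : List (List Int)), pvShape 101 g →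
    pvShape 101 (walls.foldl (fun g pos =>
      match pos.map (fun i => PySem.Int.floordiv i 6) with
      | [x, y, dx, dy] =>
          (PySem.List.pyRange (max (x - 2) 0) (min (x + dx + 2) 101) 1).foldl (fun g i =>
            (PySem.List.pyRange (max (y - 2) 0) (min (y + dy + 2) 101) 1).foldl (fun g j =>
              pvSetCell g i j WALL) g) g
      | _ => g) g) ∧
    ∀ p q : Nat, p < 101 → q < 101 →
      pvRead (walls.foldl (fun g pos =>
        match pos.map (fun i => PySem.Int.floordiv i 6) with
        | [x, y, dx, dy] =>
            (PySem.List.pyRange (max (x - 2) 0) (min (x + dx + 2) 101) 1).foldl (fun g i =>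
              (PySem.List.pyRange (max (y - 2) 0) (min (y + dy + 2) 101) 1).foldl (fun g j =>
                pvSetCell g i j WALL) g) g
        | _ => g) g) p q =
        if pvBlocked walls (p : Int) (q : Int) then 0 else pvRead g p q := by
  induction walls with
  | nil =>
    intro g hg
    exact ⟨hg, fun p q hp hq => by simp [pvBlocked]⟩
  | cons pos rest ih =>
    intro g hg
    have hlen : pos.length = 4 := hpre pos (by simp)
    have hpre' : ∀ pos ∈ rest, pos.length = 4 := fun p hp => hpre p (by simp [hp])
    rcases pos with _ | ⟨a, _ | ⟨b, _ | ⟨c, _ | ⟨d, tl⟩⟩⟩⟩ <;> simp at hlen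
    have htl : tl = [] := by simpa using hlen
    subst htl
    simp only [List.foldl_cons, List.map]
    set x := PySem.Int.floordiv a 6 with hx
    set y := PySem.Int.floordiv b 6 with hy
    set dx := PySem.Int.floordiv c 6 with hdx
    set dy := PySem.Int.floordiv d 6 with hdy
    obtain ⟨hg1, hread1⟩ := pvRectFold (n := 101) (fun _ _ => WALL)
      (max (x - 2) 0) (min (x + dx + 2) 101) (max (y - 2) 0) (min (y + dy + 2) 101) g hg
      (by omega) (by norm_num) (by omega) (by norm_num)
    obtain ⟨hsh, hread⟩ := ih hpre' _ hg1
    refine ⟨hsh, fun p q hp hq => ?_⟩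
    rw [hread p q hp hq, hread1 p q hp hq]
    have hb : pvBlocked ([a, b, c, d] :: rest) (p : Int) (q : Int) =
        ((decide (max (x - 2) 0 ≤ (p : Int)) && decide ((p : Int) < min (x + dx + 2) 101) &&
          decide (max (y - 2) 0 ≤ (q : Int)) && decide ((q : Int) < min (y + dy + 2) 101)) ||
         pvBlocked rest (p : Int) (q : Int)) := by
      simp only [pvBlocked, List.any_cons, List.map]
      rw [hx, hy, hdx, hdy]
    rw [hb]
    by_cases hc : max (x - 2) 0 ≤ (p : Int) ∧ (p : Int) < min (x + dx + 2) 101 ∧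
        max (y - 2) 0 ≤ (q : Int) ∧ (q : Int) < min (y + dy + 2) 101
    · rw [if_pos hc]
      have : (decide (max (x - 2) 0 ≤ (p : Int)) && decide ((p : Int) < min (x + dx + 2) 101) &&
          decide (max (y - 2) 0 ≤ (q : Int)) && decide ((q : Int) < min (y + dy + 2) 101)) = true := by
        simp [hc.1, hc.2.1, hc.2.2.1, hc.2.2.2]
      rw [this, Bool.true_or, if_pos rfl]
      split <;> rfl
    · rw [if_neg hc]
      have : (decide (max (x - 2) 0 ≤ (p : Int)) && decide ((p : Int) < min (x + dx + 2) 101) &&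
          decide (max (y - 2) 0 ≤ (q : Int)) && decide ((q : Int) < min (y + dy + 2) 101)) = false := by
        rw [Bool.and_eq_false_iff, Bool.and_eq_false_iff, Bool.and_eq_false_iff]
        by_cases h1 : max (x - 2) 0 ≤ (p : Int) <;>
        by_cases h2 : (p : Int) < min (x + dx + 2) 101 <;>
        by_cases h3 : max (y - 2) 0 ≤ (q : Int) <;>
        by_cases h4 : (q : Int) < min (y + dy + 2) 101 <;>
        simp [h1, h2, h3, h4] <;> tauto
      rw [this, Bool.false_or]


theorem pvShape_replicate (n : Nat) (v : Int) :
    pvShape n (List.replicate n (List.replicate n v)) := by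
  refine ⟨by simp, fun p hp => ?_⟩
  simp [List.getElem?_replicate, hp]

theorem pvRead_replicate (n : Nat) (v : Int) (p q : Nat) (hp : p < n) (hq : q < n) :
    pvRead (List.replicate n (List.replicate n v)) p q = v := by
  simp [pvRead, List.getElem?_replicate, hp, hq]

theorem pvGetCell_eq_pvRead (g : List (List Int)) (a b : Int) :
    pvGetCell g a b = pvRead g a.natAbs b.natAbs := by
  simp [pvGetCell, pvRead, List.getD_eq_getElem?_getD]

theorem pvLarge_read (walls : List (List Int)) (hpre : Pre_generate_maze walls)
    (p q : Nat) (hp : p < 101) (hq : q < 101) :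
    pvRead (pvLarge walls) p q = if pvBlocked walls (p : Int) (q : Int) then 0 else 1 := by
  have h := (pvWallsFold walls hpre _ (pvShape_replicate 101 PASS)).2 p q hp hq
  rw [pvLarge, h, pvRead_replicate 101 PASS p q hp hq]
  rfl

theorem pvRead_eq_getElem (g : List (List Int)) (p q : Nat)
    (hp : p < g.length) (hq : q < g[p].length) :
    pvRead g p q = g[p][q] := by
  simp [pvRead, List.getElem?_eq_getElem, hp, hq]

-- ===== VERDICT (by name: the statement is the Claim_ definition above) =====
theorem pvMazeFold (walls : List (List Int)) :
    pvShape 21 (generate_maze walls) ∧ ∀ p q : Nat, p < 21 → q < 21 →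
      pvRead (generate_maze walls) p q =
        if 0 ≤ (p:Int) ∧ (p:Int) < 20 ∧ 0 ≤ (q:Int) ∧ (q:Int) < 20
        then pvGetCell (pvLarge walls) ((p:Int)*5+1) ((q:Int)*5+1)
        else pvRead (List.replicate 21 (List.replicate 21 0)) p q := by
  have h := pvRectFold (n := 21) (fun i j => pvGetCell (pvLarge walls) (i*5+1) (j*5+1))
      0 20 0 20 (List.replicate 21 (List.replicate 21 0)) (pvShape_replicate 21 0)
      (by norm_num) (by norm_num) (by norm_num) (by norm_num)
  exact h

set_option maxRecDepth 100000 in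
theorem generate_maze_spec : Claim_equal_generate_maze := by
  intro walls _ hpre
  unfold Spec_generate_maze
  obtain ⟨hms, hmr⟩ := pvMazeFold walls
  have hgm : (generate_maze walls).length = 21 := hms.1
  have halt : (generate_maze_alt walls).length = 21 := by
    rw [generate_maze_alt, List.length_map, PySem.List.length_pyRange_one]; decide
  apply List.ext_getElem (hgm.trans halt.symm)
  intro p hp hp'
  have hp21 : p < 21 := by omega
  have hrange : p < (PySem.List.pyRange 0 21 1).length := by
    rw [PySem.List.length_pyRange_one]; omega
  have hrowlen : ((generate_maze walls)[p]?.getD []).length = 21 := hms.2 p hp21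
  have hrowlen' : ((generate_maze walls)[p]'hp).length = 21 := by
    rwa [List.getElem?_eq_getElem hp, Option.getD_some] at hrowlen
  simp only [generate_maze_alt, List.getElem_map]
  rw [PySem.List.getElem_pyRange_one 0 21 p hrange, zero_add]
  have hlen2 : ∀ f : Int → Int, ((PySem.List.pyRange 0 21 1).map f).length = 21 := by
    intro f; rw [List.length_map, PySem.List.length_pyRange_one]; decide
  apply List.ext_getElem (hrowlen'.trans (hlen2 _).symm)
  intro q hq hq'
  have hq21 : q < 21 := by omega
  have hrangeq : q < (PySem.List.pyRange 0 21 1).length := by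
    rw [PySem.List.length_pyRange_one]; omega
  rw [List.getElem_map, PySem.List.getElem_pyRange_one 0 21 q hrangeq, zero_add,
      ← pvRead_eq_getElem _ p q hp hq, hmr p q hp21 hq21]
  by_cases hcase : p < 20 ∧ q < 20
  · have hcond : (0 : Int) ≤ (p : Int) ∧ (p : Int) < 20 ∧ (0 : Int) ≤ (q : Int) ∧ (q : Int) < 20 :=
      ⟨by omega, by omega, by omega, by omega⟩
    rw [if_pos hcond]
    have hnp : ((p : Int) * 5 + 1).natAbs = 5 * p + 1 := by omega
    have hnq : ((q : Int) * 5 + 1).natAbs = 5 * q + 1 := by omega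
    rw [pvGetCell_eq_pvRead, hnp, hnq,
        pvLarge_read walls hpre _ _ (by omega) (by omega)]
    have hcp : ((5 * p + 1 : Nat) : Int) = (p : Int) * 5 + 1 := by push_cast; ring
    have hcq : ((5 * q + 1 : Nat) : Int) = (q : Int) * 5 + 1 := by push_cast; ring
    rw [hcp, hcq]
    by_cases hb : pvBlocked walls ((p : Int) * 5 + 1) ((q : Int) * 5 + 1) = true
    · rw [if_pos hb, if_pos (Or.inr (Or.inr hb))]
    · have hnor : ¬ (20 ≤ (p : Int) ∨ 20 ≤ (q : Int) ∨
          pvBlocked walls ((p : Int) * 5 + 1) ((q : Int) * 5 + 1) = true) := by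
        intro hor
        rcases hor with h1 | h2 | h3
        · omega
        · omega
        · exact hb h3
      rw [if_neg hb, if_neg hnor]
  · have hcond : ¬ ((0 : Int) ≤ (p : Int) ∧ (p : Int) < 20 ∧ (0 : Int) ≤ (q : Int) ∧ (q : Int) < 20) := by
      omega
    rw [if_neg hcond, pvRead_replicate 21 0 p q hp21 hq21,
        if_pos (show 20 ≤ (p : Int) ∨ 20 ≤ (q : Int) ∨
          pvBlocked walls ((p : Int) * 5 + 1) ((q : Int) * 5 + 1) = true by omega)]
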